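-- pv_equiv track=rewrite | github.com/SantOvalle08/ProyectoAnalisisAlgoritmos | Backend/app/services/ml_analysis/frequency/concept_analyzer.py | find_concept_in_text
-- ===== SOURCE A (Python) =====
-- from typing import List, Dict, Set, Tuple, Optional, Any
--
-- def find_concept_in_text(
--
--     text: str,
--     concept: str,
--     context_window: int = 50
-- ) -> Tuple[int, List[str]]:
--     """
--     Busca un concepto en un texto y extrae contextos.
--
--     El concepto puede ser una palabra simple o una frase multi-palabra.
--     La búsqueda es case-insensitive.
--
--     Args:
--         text: Texto donde buscar
--         concept: Concepto a buscar (ej: "machine learning")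
--         context_window: Caracteres de contexto antes/después
--
--     Returns:
--         Tupla (count, contexts) donde:
--         - count: Número de ocurrencias
--         - contexts: Lista de fragmentos de contexto
--     """
--     if not text or not concept:
--         return 0, []
--
--     # Preprocesar concepto y texto
--     concept_lower = concept.lower()
--     text_lower = text.lower()
--
--     # Contar ocurrencias
--     count = text_lower.count(concept_lower)
--
--     if count == 0:
--         return 0, []
--
--     # Extraer contextos
--     contexts = []
--     start = 0
--
--     while True:
--         # Encontrar siguiente ocurrencia
--         pos = text_lower.find(concept_lower, start)
--
--         if pos == -1:
--             break
--
--         # Extraer contexto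
--         context_start = max(0, pos - context_window)
--         context_end = min(len(text), pos + len(concept) + context_window)
--
--         context = text[context_start:context_end].strip()
--
--         # Agregar elipsis si el contexto está truncado
--         if context_start > 0:
--             context = "..." + context
--         if context_end < len(text):
--             context = context + "..."
--
--         contexts.append(context)
--
--         # Continuar búsqueda después de esta ocurrencia
--         start = pos + len(concept)
--
--     return count, contexts
-- ===== SOURCE B (Python) =====
-- def find_concept_in_text(
--     text: str,
--     concept: str,
--     context_window: int = 50
-- ):
--     # Split-based algorithm: splitting the lowercased text on the lowercased
--     # concept yields the segments BETWEEN (non-overlapping, leftmost) matches,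
--     # so the match positions are the prefix sums of the segment lengths
--     # (each match sits right after its preceding segment). Contexts are then
--     # built from that positions list; the count is its length. No find/count
--     # scanning loop at all.
--     if not text or not concept:
--         return 0, []
--
--     concept_lower = concept.lower()
--     parts = text.lower().split(concept_lower)
--
--     positions = []
--     acc = 0
--     for part in parts[:-1]:
--         acc += len(part)
--         positions.append(acc)
--         acc += len(concept)
--
--     n = len(text)
--     contexts = []
--     for pos in positions:
--         context_start = max(0, pos - context_window)
--         context_end = min(n, pos + len(concept) + context_window)
--         snippet = text[context_start:context_end].strip()
--         if context_start > 0: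
--             snippet = "..." + snippet
--         if context_end < n:
--             snippet = snippet + "..."
--         contexts.append(snippet)
--
--     return len(positions), contexts
-- ===== Notes on version B (the rewrite author's own statement) =====
-- stated objective: alternative
-- what changed: Replaces A's str.count pass plus a while-loop of repeated str.find calls with a split-based algorithm: one str.split on the lowercased concept, match positions recovered as prefix sums of the split segments' lengths, then contexts built from that positions list.
import Mathlib
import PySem

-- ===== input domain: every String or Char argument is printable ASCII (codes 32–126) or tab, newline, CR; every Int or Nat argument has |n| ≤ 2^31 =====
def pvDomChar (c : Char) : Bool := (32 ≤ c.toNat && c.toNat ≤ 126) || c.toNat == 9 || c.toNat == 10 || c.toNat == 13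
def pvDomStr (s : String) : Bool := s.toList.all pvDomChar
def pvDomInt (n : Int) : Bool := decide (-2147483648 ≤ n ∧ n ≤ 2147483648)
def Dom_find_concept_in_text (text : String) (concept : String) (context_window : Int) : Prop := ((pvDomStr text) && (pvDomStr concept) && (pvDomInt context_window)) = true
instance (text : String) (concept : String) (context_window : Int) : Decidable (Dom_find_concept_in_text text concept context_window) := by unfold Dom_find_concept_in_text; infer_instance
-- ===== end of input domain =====

-- B replaces A's count pass + find loop by a split-on-concept pass whose segment lengths give the
-- match positions as prefix sums; objective: alternative (same value, different algorithm).

-- ===== PORT A =====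
-- A's `while True: pos = text_lower.find(concept_lower, start) …` loop.
-- Fuel guard only (Python has none): fuel = len(text_lower)+1 suffices because the loop
-- is reached only with a nonempty concept, so `start` strictly increases each iteration.
def aLoop (t tl cl : List Char) (L : Nat) (cw : Int) : Nat → Nat → List String
  | 0, _ => []
  | fuel+1, start =>
    let pos := PySem.Chars.findFrom tl cl (start : Int)
    if pos = -1 then []
    else
      let p := pos.toNat
      let cs : Int := max 0 ((p : Int) - cw)
      let ce : Int := min ((t.length : Int)) ((p : Int) + (L : Int) + cw)
      let c0 := PySem.Chars.strip (PySem.List.slice t (some cs) (some ce))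
      let c1 := if 0 < cs then '.' :: '.' :: '.' :: c0 else c0
      let c2 := if ce < (t.length : Int) then c1 ++ ['.', '.', '.'] else c1
      String.ofList c2 :: aLoop t tl cl L cw fuel (p + L)

def find_concept_in_text (text : String) (concept : String) (context_window : Int) : Int × List String :=
  let t := text.toList
  let c := concept.toList
  if t.isEmpty || c.isEmpty then (0, [])
  else
    let concept_lower := PySem.Chars.lower c
    let text_lower := PySem.Chars.lower t
    let count := PySem.Chars.count text_lower concept_lower
    if count = 0 then (0, [])
    else ((count : Int), aLoop t text_lower concept_lower c.length context_window (text_lower.length + 1) 0)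

-- ===== PORT B =====
-- Source B's second loop body (`for pos in positions: …`), as the mapped function.
def ctxOf (t : List Char) (L : Nat) (cw : Int) (pos : Nat) : String :=
  let context_start : Int := max 0 ((pos : Int) - cw)
  let context_end : Int := min ((t.length : Int)) ((pos : Int) + (L : Int) + cw)
  let s0 := PySem.Chars.strip (PySem.List.slice t (some context_start) (some context_end))
  let s1 := if 0 < context_start then '.' :: '.' :: '.' :: s0 else s0
  let s2 := if context_end < (t.length : Int) then s1 ++ ['.', '.', '.'] else s1
  String.ofList s2

-- Source B's first loop: `for part in parts[:-1]: acc += len(part); positions.append(acc); acc += len(concept)`.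
def posAcc (L : Nat) : List (List Char) → Nat → List Nat
  | [], _ => []
  | p :: ps, acc => (acc + p.length) :: posAcc L ps (acc + p.length + L)

def find_concept_in_text_alt (text : String) (concept : String) (context_window : Int) : Int × List String :=
  let t := text.toList
  let c := concept.toList
  if t.isEmpty || c.isEmpty then (0, [])
  else
    let concept_lower := PySem.Chars.lower c
    let parts := PySem.Chars.splitOn (PySem.Chars.lower t) concept_lower
    let positions := posAcc c.length parts.dropLast 0   -- parts[:-1]
    let contexts := positions.map (ctxOf t c.length context_window)
    ((positions.length : Int), contexts)

-- ===== PRECONDITION & SPEC =====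
def Spec_find_concept_in_text (text : String) (concept : String) (context_window : Int) (out : Int × List String) : Prop := out = find_concept_in_text_alt text concept context_window
instance (text : String) (concept : String) (context_window : Int) (out : Int × List String) : Decidable (Spec_find_concept_in_text text concept context_window out) := by unfold Spec_find_concept_in_text; infer_instance

-- ===== CLAIM (what is proved, stated in full; the proofs are below) =====
def Claim_equal_find_concept_in_text : Prop := ∀ (text : String) (concept : String) (context_window : Int), Dom_find_concept_in_text text concept context_window → Spec_find_concept_in_text text concept context_window (find_concept_in_text text concept context_window)

-- ===== LEMMAS AND PROOFS =====

-- Proof-only intermediate: the list of (non-overlapping, leftmost) match positions,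
-- by a left-to-right scan. Both ports' results are expressed through it.
def scanPos (cl : List Char) (L : Nat) : List Char → Nat → List Nat
  | [], _ => []
  | rem@(_ :: rest), i =>
    if cl.isPrefixOf rem then i :: scanPos cl L (rest.drop (L - 1)) (i + L)
    else scanPos cl L rest (i + 1)
  termination_by rem _ => rem.length
  decreasing_by
    · simp only [List.length_cons, List.length_drop]; omega
    · simp

theorem scanPos_eq_nil (cl : List Char) (L : Nat) (rem : List Char) (i : Nat)
    (h : ∀ j, ¬ cl <+: rem.drop j) : scanPos cl L rem i = [] := by
  induction rem generalizing i with
  | nil => simp [scanPos]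
  | cons a rest ih =>
    rw [scanPos]
    have h0 : ¬ cl.isPrefixOf (a :: rest) = true := by
      simpa [List.isPrefixOf_iff_prefix] using h 0
    simp only [h0, Bool.false_eq_true, if_false]
    exact ih (i + 1) (fun j => by simpa using h (j + 1))

theorem scanPos_skip (cl : List Char) (L : Nat) (m : Nat) (rem : List Char) (i : Nat)
    (h : ∀ j, j < m → ¬ cl <+: rem.drop j) :
    scanPos cl L rem i = scanPos cl L (rem.drop m) (i + m) := by
  induction m generalizing rem i with
  | zero => simp
  | succ m ih =>
    cases rem with
    | nil => simp [scanPos]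
    | cons a rest =>
      rw [scanPos]
      have h0 : ¬ cl.isPrefixOf (a :: rest) = true := by
        simpa [List.isPrefixOf_iff_prefix] using h 0 (Nat.succ_pos m)
      simp only [h0, Bool.false_eq_true, if_false]
      rw [ih rest (i + 1) (fun j hj => by simpa using h (j + 1) (by omega))]
      simp only [List.drop_succ_cons]
      congr 1
      omega

theorem scanPos_match (cl : List Char) (L : Nat) (rem : List Char) (i : Nat)
    (hcl : cl ≠ []) (hL : cl.length = L) (hp : cl <+: rem) :
    scanPos cl L rem i = i :: scanPos cl L (rem.drop L) (i + L) := by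
  cases rem with
  | nil => exact absurd (List.prefix_nil.mp hp) hcl
  | cons a rest =>
    rw [scanPos]
    have hp' : cl.isPrefixOf (a :: rest) = true := List.isPrefixOf_iff_prefix.mpr hp
    simp only [hp', if_true]
    have hdrop : rest.drop (L - 1) = (a :: rest).drop L := by
      cases L with
      | zero => exact absurd (List.length_eq_zero_iff.mp hL) hcl
      | succ k => simp [List.drop_succ_cons]
    rw [hdrop]

theorem count_go_eq (cl : List Char) (L : Nat) (hL : cl.length = L) (hL1 : 1 ≤ L) :
    ∀ (fuel : Nat) (rem : List Char) (acc i : Nat), rem.length ≤ fuel →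
    PySem.Chars.count.go cl fuel rem acc = acc + (scanPos cl L rem i).length := by
  intro fuel
  induction fuel with
  | zero =>
    intro rem acc i hf
    have : rem = [] := List.length_eq_zero_iff.mp (Nat.le_zero.mp hf)
    subst this
    simp [PySem.Chars.count.go, scanPos]
  | succ fuel ih =>
    intro rem acc i hf
    cases rem with
    | nil => simp [PySem.Chars.count.go, scanPos]
    | cons a rest =>
      rw [PySem.Chars.count.go, scanPos]
      by_cases hp : cl.isPrefixOf (a :: rest) = true
      · simp only [hp, if_true]
        have hdrop : List.drop cl.length (a :: rest) = rest.drop (L - 1) := by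
          rw [hL]
          cases L with
          | zero => omega
          | succ k => simp [List.drop_succ_cons]
        rw [hdrop, ih (rest.drop (L - 1)) (acc + 1) (i + L) (by simp only [List.length_drop, List.length_cons] at hf ⊢; omega)]
        simp only [List.length_cons]
        omega
      · simp only [hp, Bool.false_eq_true, if_false]
        exact ih rest acc (i + 1) (by simp at hf ⊢; omega)

theorem findFrom_past_len (tl cl : List Char) (k : Nat) (h : tl.length < k) :
    PySem.Chars.findFrom tl cl (k : Int) none = -1 := by
  simp only [PySem.Chars.findFrom]
  split_ifs <;> omega

-- A side: the find loop emits exactly the contexts of the scan positions.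
theorem aLoop_eq (t tl cl : List Char) (L : Nat) (cw : Int) (hL : cl.length = L) (hL1 : 1 ≤ L) :
    ∀ (fuel start : Nat), tl.length - start < fuel →
    aLoop t tl cl L cw fuel start = (scanPos cl L (tl.drop start) start).map (ctxOf t L cw) := by
  have hcl : cl ≠ [] := by
    intro h; rw [h] at hL; simp at hL; omega
  intro fuel
  induction fuel with
  | zero => intro start h; omega
  | succ fuel ih =>
    intro start hf
    rw [aLoop]
    by_cases hpos : PySem.Chars.findFrom tl cl (start : Int) = -1
    · simp only [hpos, if_pos]
      by_cases hk : start ≤ tl.length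
      · have hni := (PySem.Chars.findFrom_natCast_eq_neg_one_iff tl cl start hk).mp hpos
        rw [scanPos_eq_nil cl L _ start ?_]
        · simp
        · intro j hpre
          exact hni (List.IsInfix.trans hpre.isInfix (List.drop_suffix j _).isInfix)
      · rw [List.drop_eq_nil_of_le (by omega)]
        simp [scanPos]
    · rw [if_neg hpos]
      have hk : start ≤ tl.length := by
        by_contra hgt
        exact hpos (findFrom_past_len tl cl start (by omega))
      obtain ⟨h1, h2, h3⟩ := PySem.Chars.findFrom_natCast_spec tl cl start hk hpos
      set pos := PySem.Chars.findFrom tl cl (start : Int) with hposdef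
      have hpnn : 0 ≤ pos := le_trans (by exact_mod_cast Int.natCast_nonneg start) h1
      set p := pos.toNat with hpdef
      have hsp : start ≤ p := by omega
      have hplen : p < tl.length := by
        by_contra hge
        rw [List.drop_eq_nil_of_le (by omega)] at h2
        exact hcl (List.prefix_nil.mp h2)
      have hskip : scanPos cl L (tl.drop start) start = scanPos cl L (tl.drop p) p := by
        have hps : start + (p - start) = p := by omega
        rw [scanPos_skip cl L (p - start) (tl.drop start) start ?_]
        · rw [List.drop_drop, hps]
        · intro j hj hpre
          rw [List.drop_drop] at hpre
          exact h3 (start + j) (by omega) (by omega) hpre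
      rw [hskip, scanPos_match cl L (tl.drop p) p hcl hL h2, List.drop_drop]
      simp only [List.map_cons]
      exact congrArg₂ List.cons rfl (ih (p + L) (by omega))

-- splitOn.go: the accumulator is just prepended (reversed).
theorem splitOn_go_acc (sep : List Char) :
    ∀ (fuel : Nat) (rem cur : List Char) (acc : List (List Char)),
    PySem.Chars.splitOn.go sep fuel rem cur acc = acc.reverse ++ PySem.Chars.splitOn.go sep fuel rem cur [] := by
  intro fuel
  induction fuel with
  | zero => intro rem cur acc; simp [PySem.Chars.splitOn.go]
  | succ fuel ih =>
    intro rem cur acc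
    cases rem with
    | nil => simp [PySem.Chars.splitOn.go]
    | cons c rest =>
      rw [PySem.Chars.splitOn.go, PySem.Chars.splitOn.go]
      by_cases hp : sep.isPrefixOf (c :: rest) = true
      · simp only [hp, if_true]
        rw [ih _ _ (cur.reverse :: acc), ih _ _ [cur.reverse]]
        simp
      · simp only [hp, Bool.false_eq_true, if_false]
        exact ih rest (c :: cur) acc

-- splitOn.go: the current-segment buffer just prefixes (reversed) the first emitted part.
theorem splitOn_go_cur (sep : List Char) :
    ∀ (fuel : Nat) (rem cur : List Char),
    PySem.Chars.splitOn.go sep fuel rem cur [] =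
      (PySem.Chars.splitOn.go sep fuel rem [] []).modifyHead (cur.reverse ++ ·) := by
  intro fuel
  induction fuel with
  | zero => intro rem cur; simp [PySem.Chars.splitOn.go]
  | succ fuel ih =>
    intro rem cur
    cases rem with
    | nil => simp [PySem.Chars.splitOn.go]
    | cons c rest =>
      rw [PySem.Chars.splitOn.go, PySem.Chars.splitOn.go]
      by_cases hp : sep.isPrefixOf (c :: rest) = true
      · simp only [hp, if_true, List.reverse_nil]
        rw [splitOn_go_acc sep fuel _ [] [cur.reverse], splitOn_go_acc sep fuel _ [] [[]]]
        simp
      · simp only [hp, Bool.false_eq_true, if_false]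
        rw [ih rest (c :: cur), ih rest [c]]
        simp [List.modifyHead_modifyHead, Function.comp_def]

theorem splitOn_go_ne_nil (sep : List Char) :
    ∀ (fuel : Nat) (rem cur : List Char) (acc : List (List Char)),
    PySem.Chars.splitOn.go sep fuel rem cur acc ≠ [] := by
  intro fuel
  induction fuel with
  | zero => intro rem cur acc; simp [PySem.Chars.splitOn.go]
  | succ fuel ih =>
    intro rem cur acc
    cases rem with
    | nil => simp [PySem.Chars.splitOn.go]
    | cons c rest =>
      rw [PySem.Chars.splitOn.go]
      by_cases hp : sep.isPrefixOf (c :: rest) = true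
      · simp only [hp, if_true]; exact ih _ _ _
      · simp only [hp, Bool.false_eq_true, if_false]; exact ih _ _ _

-- B side: prefix sums of the split segments' lengths are exactly the scan positions.
theorem posAcc_splitOn_go (cl : List Char) (L : Nat) (hL : cl.length = L) (hL1 : 1 ≤ L) :
    ∀ (fuel : Nat) (rem : List Char) (i : Nat), rem.length < fuel →
    posAcc L (PySem.Chars.splitOn.go cl fuel rem [] []).dropLast i = scanPos cl L rem i := by
  have hcl : cl ≠ [] := by
    intro h; rw [h] at hL; simp at hL; omega
  intro fuel
  induction fuel with
  | zero => intro rem i h; omega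
  | succ fuel ih =>
    intro rem i hf
    cases rem with
    | nil => simp [PySem.Chars.splitOn.go, posAcc, scanPos]
    | cons c rest =>
      rw [PySem.Chars.splitOn.go, scanPos]
      by_cases hp : cl.isPrefixOf (c :: rest) = true
      · simp only [hp, if_true, List.reverse_nil]
        rw [splitOn_go_acc cl fuel _ [] [[]]]
        have hdropeq : rest.drop (L - 1) = (c :: rest).drop cl.length := by
          rw [hL]
          cases L with
          | zero => omega
          | succ k => simp [List.drop_succ_cons]
        have hne := splitOn_go_ne_nil cl fuel (List.drop cl.length (c :: rest)) [] []
        obtain ⟨x, xs, hx⟩ := List.exists_cons_of_ne_nil hne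
        have hrec := ih (List.drop cl.length (c :: rest)) (i + L) (by
          simp only [List.length_drop, List.length_cons] at hf ⊢; omega)
        rw [hx] at hrec
        rw [hx]
        simp only [List.reverse_cons, List.reverse_nil, List.nil_append, List.singleton_append]
        rw [List.dropLast_cons_of_ne_nil (List.cons_ne_nil x xs)]
        simp only [posAcc, List.length_nil, Nat.add_zero]
        rw [hdropeq]
        exact congrArg₂ List.cons rfl hrec
      · simp only [hp, Bool.false_eq_true, if_false]
        rw [splitOn_go_cur cl fuel rest [c]]
        have hne := splitOn_go_ne_nil cl fuel rest [] []
        obtain ⟨x, xs, hx⟩ := List.exists_cons_of_ne_nil hne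
        have hrec := ih rest (i + 1) (by simp only [List.length_cons] at hf; omega)
        rw [hx] at hrec
        rw [hx]
        simp only [List.modifyHead_cons, List.reverse_cons, List.reverse_nil, List.nil_append,
          List.singleton_append]
        cases xs with
        | nil => simpa [posAcc] using hrec
        | cons y ys =>
          rw [List.dropLast_cons_of_ne_nil (List.cons_ne_nil y ys)] at hrec
          simp only [posAcc] at hrec
          rw [List.dropLast_cons_of_ne_nil (List.cons_ne_nil y ys)]
          simp only [posAcc, List.length_cons]
          rw [show i + (x.length + 1) = i + 1 + x.length by omega]
          exact hrec

-- ===== VERDICT (by name: the statement is the Claim_ definition above) =====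
theorem find_concept_in_text_spec : Claim_equal_find_concept_in_text := by
  intro text concept cw _
  unfold Spec_find_concept_in_text
  simp only [find_concept_in_text, find_concept_in_text_alt]
  by_cases he : (text.toList.isEmpty || concept.toList.isEmpty) = true
  · rw [if_pos he, if_pos he]
  · rw [if_neg he, if_neg he]
    have hc : concept.toList ≠ [] := by
      intro h
      exact he (by simp [h])
    have hL1 : 1 ≤ concept.toList.length := List.length_pos_iff.mpr hc
    have hL : (PySem.Chars.lower concept.toList).length = concept.toList.length := by
      simp [PySem.Chars.lower]
    have hcle : (PySem.Chars.lower concept.toList).isEmpty = false := by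
      simp only [List.isEmpty_eq_false_iff_exists_mem]
      rcases List.exists_mem_of_ne_nil _ hc with ⟨x, hx⟩
      exact ⟨_, List.mem_map_of_mem hx⟩
    have hpos : posAcc concept.toList.length
        (PySem.Chars.splitOn (PySem.Chars.lower text.toList) (PySem.Chars.lower concept.toList)).dropLast 0
        = scanPos (PySem.Chars.lower concept.toList) concept.toList.length (PySem.Chars.lower text.toList) 0 := by
      rw [PySem.Chars.splitOn]
      exact posAcc_splitOn_go (PySem.Chars.lower concept.toList) concept.toList.length hL hL1
        ((PySem.Chars.lower text.toList).length + 1) (PySem.Chars.lower text.toList) 0 (by omega)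
    have hcount : PySem.Chars.count (PySem.Chars.lower text.toList) (PySem.Chars.lower concept.toList)
        = (scanPos (PySem.Chars.lower concept.toList) concept.toList.length (PySem.Chars.lower text.toList) 0).length := by
      rw [PySem.Chars.count, if_neg (by simp [hcle])]
      simpa using count_go_eq (PySem.Chars.lower concept.toList) concept.toList.length
        hL hL1 (PySem.Chars.lower text.toList).length (PySem.Chars.lower text.toList) 0 0 (Nat.le_refl _)
    by_cases h0 : PySem.Chars.count (PySem.Chars.lower text.toList) (PySem.Chars.lower concept.toList) = 0
    · rw [if_pos h0]
      have hnil : scanPos (PySem.Chars.lower concept.toList) concept.toList.length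
          (PySem.Chars.lower text.toList) 0 = [] :=
        List.length_eq_zero_iff.mp (by omega)
      rw [hpos, hnil]
      simp
    · rw [if_neg h0]
      have hloop := aLoop_eq text.toList (PySem.Chars.lower text.toList) (PySem.Chars.lower concept.toList)
        concept.toList.length cw hL hL1 ((PySem.Chars.lower text.toList).length + 1) 0 (by omega)
      rw [List.drop_zero] at hloop
      rw [hloop, hpos, hcount]
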